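-- pv_equiv track=rewrite | github.com/liupengsay/PyIsTheBestLang | src/data_structure/priority_queue/problem.py | lc_2386
-- ===== SOURCE A (Python) =====
-- import heapq
-- from heapq import heappushpop, heappush, heappop, heapify
-- from typing import List
--
-- def lc_2386(nums: List[int], k: int) -> int:
--     """
--     url: https://leetcode.cn/problems/find-the-k-sum-of-an-array/
--     tag: heapq|brain_teaser|dijkstra|classical|hard
--     """
--     n = len(nums)
--     tot = 0
--     for i in range(n):
--         if nums[i] >= 0:
--             tot += nums[i]
--         else:
--             nums[i] = -nums[i]
--     nums.sort()
--
--     stack = [(-tot, 0)]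
--     for _ in range(k - 1):
--         pre, i = heappop(stack)
--         if i < n:
--             heapq.heappush(stack, (pre + nums[i], i + 1))
--             if i:
--                 heapq.heappush(stack, (pre + nums[i] - nums[i - 1], i + 1))
--     return -stack[0][0]
-- ===== SOURCE B (Python) =====
-- def lc_2386(nums, k):
--     n = len(nums)
--     tot = 0
--     for i in range(n):
--         if nums[i] >= 0:
--             tot += nums[i]
--         else:
--             nums[i] = -nums[i]
--     nums.sort()
--     kk = k if k > 1 else 1
--     # only the kk smallest absolute values can contribute to the kk smallest removal sums
--     ws = nums[:kk]
--     cur = [0]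
--     for x in ws:
--         cur = sorted(cur + [c + x for c in cur])[:kk]
--     return tot - cur[kk - 1]
-- ===== Notes on version B (the rewrite author's own statement) =====
-- stated objective: alternative
-- what changed: Replaces the best-first heap (Dijkstra-style frontier over (sum, index) states) by a sorted dynamic program: keep the k smallest removal sums of a growing prefix, doubling and re-truncating to the k smallest at each element, after first truncating the sorted absolute values to the k smallest elements (only they can matter).
import Mathlib
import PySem

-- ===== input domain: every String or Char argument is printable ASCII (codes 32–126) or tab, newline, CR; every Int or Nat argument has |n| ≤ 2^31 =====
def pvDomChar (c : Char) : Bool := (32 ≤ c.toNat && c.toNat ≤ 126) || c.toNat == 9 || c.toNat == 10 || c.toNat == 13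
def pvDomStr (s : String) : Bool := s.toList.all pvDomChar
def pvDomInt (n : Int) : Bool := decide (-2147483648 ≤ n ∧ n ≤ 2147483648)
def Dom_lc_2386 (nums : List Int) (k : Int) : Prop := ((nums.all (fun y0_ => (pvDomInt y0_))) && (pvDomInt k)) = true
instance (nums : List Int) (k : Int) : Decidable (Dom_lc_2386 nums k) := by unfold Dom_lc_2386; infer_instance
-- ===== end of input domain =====

-- B replaces A's best-first heap search by a sorted dynamic program over the k smallest
-- prefix removal sums (objective: alternative; not faster).  Both A and B mutate the Python
-- argument `nums` identically (absolute values, then sort); the equivalence proved here is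
-- about the RETURN value (the mutation is the same in both).

-- ===== PORT A =====
-- shared preprocessing (textually identical in Source A and Source B): the loop that accumulates
-- the nonnegative entries into tot and replaces negatives by their absolute value.
def pvAbsTot (nums : List Int) : Int × List Int :=
  nums.foldl (fun st x => if x ≥ 0 then (st.1 + x, st.2 ++ [x]) else (st.1, st.2 ++ [-x])) (0, [])

-- Python tuple comparison (pre, i) < (pre', i')
def pvLexLt (a b : Int × Int) : Bool := a.1 < b.1 || (a.1 == b.1 && a.2 < b.2)

-- heapq modelled as a plain list: heappop returns the heap's minimum tuple (lexicographic),
-- and stack[0] is that same minimum — exact for the observable values of Source A.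
def pvHeapMin : List (Int × Int) → Option (Int × Int)
  | [] => none
  | x :: t => some (t.foldl (fun m y => if pvLexLt y m then y else m) x)

-- the two heappush calls performed for a popped (pre, i); indices are in range (0 ≤ i < n).
def pvPush (ys : List Int) (n : Int) (pre i : Int) (h : List (Int × Int)) : List (Int × Int) :=
  if i < n then
    let h1 := (pre + PySem.List.pyGetD ys i 0, i + 1) :: h
    if i ≠ 0 then (pre + PySem.List.pyGetD ys i 0 - PySem.List.pyGetD ys (i - 1) 0, i + 1) :: h1
    else h1
  else h

-- `for _ in range(k - 1): …` ; `none` = heappop on an empty heap (IndexError)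
def pvALoop (ys : List Int) (n : Int) : Nat → List (Int × Int) → Option (List (Int × Int))
  | 0, h => some h
  | j + 1, h =>
    match pvHeapMin h with
    | none => none
    | some m => pvALoop ys n j (pvPush ys n m.1 m.2 (h.erase m))

def lc_2386 (nums : List Int) (k : Int) : Int :=
  let st := pvAbsTot nums
  let ys := PySem.List.sorted st.2 (fun x => x) false
  let n : Int := ys.length
  match pvALoop ys n (k - 1).toNat [(-st.1, 0)] with
  | none => 0                                   -- IndexError: outside Pre_
  | some h =>
    match pvHeapMin h with
    | none => 0                                 -- stack[0] IndexError: outside Pre_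
    | some m => -m.1

-- ===== PORT B =====
-- one step of Source B's loop: cur = sorted(cur + [c + x for c in cur])[:kk]  (kk ≥ 1, so the
-- slice [:kk] is exactly `take`).
def pvStep (kk : Nat) (cur : List Int) (x : Int) : List Int :=
  (PySem.List.sorted (cur ++ cur.map (fun c => c + x)) (fun v => v) false).take kk

def lc_2386_alt (nums : List Int) (k : Int) : Int :=
  let st := pvAbsTot nums
  let ys := PySem.List.sorted st.2 (fun x => x) false
  let kk : Int := if k > 1 then k else 1
  let ws := ys.take kk.toNat                    -- nums[:kk]
  let cur := ws.foldl (pvStep kk.toNat) [0]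
  st.1 - PySem.List.pyGetD cur (kk - 1) 0       -- cur[kk-1]; in range inside Pre_

-- ===== PRECONDITION & SPEC =====
-- exactly the inputs on which Source A returns: with more than 2^n requested sums the heap runs
-- dry and heappop (or stack[0]) raises IndexError.
def Pre_lc_2386 (nums : List Int) (k : Int) : Prop := k ≤ 2 ^ nums.length
instance (nums : List Int) (k : Int) : Decidable (Pre_lc_2386 nums k) := by
  unfold Pre_lc_2386; infer_instance

def pvWitness_lc_2386 : List Int × Int := ([3, -1, 2], 4)

def Spec_lc_2386 (nums : List Int) (k : Int) (out : Int) : Prop := out = lc_2386_alt nums k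
instance (nums : List Int) (k : Int) (out : Int) : Decidable (Spec_lc_2386 nums k out) := by
  unfold Spec_lc_2386; infer_instance

-- ===== CLAIM (what is proved, stated in full; the proofs are below) =====
def Claim_equal_lc_2386 : Prop := ∀ (nums : List Int) (k : Int), Dom_lc_2386 nums k → Pre_lc_2386 nums k → Spec_lc_2386 nums k (lc_2386 nums k)

-- ===== LEMMAS AND PROOFS =====
def pvSort (l : List Int) : List Int := PySem.List.sorted l (fun v => v) false
def pvSS (l : List Int) : List Int := l.foldl (fun acc x => acc ++ acc.map (fun c => c + x)) [0]
def pvNes : List Int → List Int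
  | [] => []
  | x :: t => x :: ((pvNes t).map (fun u => x + u) ++ pvNes t)

theorem pvSort_perm (l : List Int) : (pvSort l).Perm l := PySem.List.sorted_perm l _ false
theorem pvSort_pairwise (l : List Int) : (pvSort l).Pairwise (· ≤ ·) := by
  simpa using PySem.List.sorted_pairwise l (fun v => v)
theorem pvSort_length (l : List Int) : (pvSort l).length = l.length :=
  (pvSort_perm l).length_eq

theorem pvSort_congr_perm {l l' : List Int} (h : l.Perm l') : pvSort l = pvSort l' :=
  PySem.List.sorted_eq_sorted_of_perm l l' (fun v => v) (fun _ _ hv => hv) h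

theorem pvSort_min_cons {X Y : List Int} {a : Int} (hp : X.Perm (a :: Y))
    (hmin : ∀ b ∈ X, a ≤ b) : pvSort X = a :: pvSort Y := by
  apply PySem.List.sorted_id_eq_of_perm_of_pairwise
  · exact (List.Perm.cons a (pvSort_perm Y)).trans hp.symm
  · refine List.pairwise_cons.mpr ⟨?_, ?_⟩
    · intro b hb
      exact hmin b (hp.symm.subset (List.mem_cons_of_mem a ((pvSort_perm Y).subset hb)))
    · simpa using pvSort_pairwise Y

theorem pvSort_shift (L : List Int) (c : Int) :
    pvSort (L.map (fun u => c + u)) = (pvSort L).map (fun u => c + u) := by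
  apply PySem.List.sorted_id_eq_of_perm_of_pairwise
  · exact (pvSort_perm L).map _
  · refine List.pairwise_map.mpr ?_
    exact (pvSort_pairwise L).imp (by intro a b h; omega)

theorem pvSort_take_drop_le {L : List Int} {m : Nat} {a b : Int}
    (ha : a ∈ (pvSort L).take m) (hb : b ∈ (pvSort L).drop m) : a ≤ b := by
  have h := pvSort_pairwise L
  rw [← List.take_append_drop m (pvSort L)] at h
  exact (List.pairwise_append.mp h).2.2 a ha b hb


theorem sorted_drop_lb {S : List Int} (hp : S.Pairwise (· ≤ ·)) {i : Nat} (hi : i < S.length) :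
    ∀ b ∈ S.drop i, S[i] ≤ b := by
  intro b hb
  obtain ⟨t, ht, hbt⟩ := List.getElem_of_mem hb
  have hlen : i + t < S.length := by
    have := ht; simp [List.length_drop] at this; omega
  have hbt' : S[i + t] = b := by rw [← hbt, List.getElem_drop]
  rcases Nat.eq_zero_or_pos t with h0 | h0
  · subst h0
    exact le_of_eq (by simpa using hbt')
  · have hle := List.pairwise_iff_getElem.mp hp i (i + t) hi hlen (by omega)
    exact hle.trans (le_of_eq hbt')

theorem pvSort_count_take_le {L : List Int} {m : Nat} {v : Int}
    (h : m ≤ L.countP (fun a => decide (a ≤ v))) :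
    ∀ a ∈ (pvSort L).take m, a ≤ v := by
  intro a ha
  by_contra hlt
  push_neg at hlt
  obtain ⟨i, hi, hget⟩ := List.getElem_of_mem ha
  have him : i < m := lt_of_lt_of_le hi (by simpa using List.length_take_le m (pvSort L))
  have hiS : i < (pvSort L).length := lt_of_lt_of_le hi (by simp)
  have hgs : (pvSort L)[i] = a := by rw [← hget]; simp [List.getElem_take]
  have hcnt : L.countP (fun a => decide (a ≤ v)) = (pvSort L).countP (fun a => decide (a ≤ v)) :=
    ((pvSort_perm L).countP_eq _).symm
  have hzero : ((pvSort L).drop i).countP (fun a => decide (a ≤ v)) = 0 := by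
    refine List.countP_eq_zero.mpr ?_
    intro b hb
    have := sorted_drop_lb (pvSort_pairwise L) hiS b hb
    simp only [decide_eq_true_eq]
    omega
  have hsplit : (pvSort L).countP (fun a => decide (a ≤ v)) =
      ((pvSort L).take i).countP (fun a => decide (a ≤ v)) +
      ((pvSort L).drop i).countP (fun a => decide (a ≤ v)) := by
    rw [← List.countP_append, List.take_append_drop]
  have hle : ((pvSort L).take i).countP (fun a => decide (a ≤ v)) ≤ i := by
    calc ((pvSort L).take i).countP (fun a => decide (a ≤ v)) ≤ ((pvSort L).take i).length :=
          List.countP_le_length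
      _ ≤ i := List.length_take_le _ _
  omega


theorem pvSort_take_append (M N : List Int) (m : Nat) (hm : m ≤ M.length)
    (hN : ∀ b ∈ N, ∀ a ∈ (pvSort M).take m, a ≤ b) :
    (pvSort (M ++ N)).take m = (pvSort M).take m := by
  have key : pvSort (M ++ N) = (pvSort M).take m ++ pvSort ((pvSort M).drop m ++ N) := by
    apply PySem.List.sorted_id_eq_of_perm_of_pairwise
    · have h1 : (List.take m (pvSort M) ++ pvSort (List.drop m (pvSort M) ++ N)).Perm
          (List.take m (pvSort M) ++ (List.drop m (pvSort M) ++ N)) :=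
        List.Perm.append_left _ (pvSort_perm _)
      have h2 : List.take m (pvSort M) ++ (List.drop m (pvSort M) ++ N) = pvSort M ++ N := by
        rw [← List.append_assoc, List.take_append_drop]
      have h3 : (pvSort M ++ N).Perm (M ++ N) := List.Perm.append_right N (pvSort_perm M)
      exact h1.trans (h2 ▸ h3)
    · refine List.pairwise_append.mpr ⟨?_, pvSort_pairwise _, ?_⟩
      · exact (pvSort_pairwise M).sublist (List.take_sublist m _)
      · intro a ha b hb
        have hb' : b ∈ (pvSort M).drop m ∨ b ∈ N := by
          have := (pvSort_perm _).subset hb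
          simpa using this
        rcases hb' with hb' | hb'
        · exact pvSort_take_drop_le ha hb'
        · exact hN b hb' a ha
  have hlen : ((pvSort M).take m).length = m := by
    rw [List.length_take, pvSort_length]
    omega
  rw [key, List.take_left' hlen]

theorem juggle1 (A B C D : List Int) : (A ++ B ++ (C ++ D)).Perm (A ++ C ++ (B ++ D)) := by
  rw [List.append_assoc, List.append_assoc]
  exact List.Perm.append_left A (List.perm_append_comm_assoc B C D)

theorem juggle2 (A M : List Int) (x : Int) : (A ++ (x :: M)).Perm (x :: (M ++ A)) := by
  have h1 : (A ++ (x :: M)).Perm ((x :: M) ++ A) := List.perm_append_comm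
  simpa using h1

theorem pvSS_append_singleton (l : List Int) (x : Int) :
    pvSS (l ++ [x]) = pvSS l ++ (pvSS l).map (fun c => c + x) := by
  simp [pvSS, List.foldl_append]

theorem pvSS_length (l : List Int) : (pvSS l).length = 2 ^ l.length := by
  induction l using List.reverseRecOn with
  | nil => rfl
  | append_singleton l x ih =>
    rw [pvSS_append_singleton]
    simp [ih]
    ring

theorem pvSS_nonneg {l : List Int} (h : ∀ y ∈ l, 0 ≤ y) : ∀ s ∈ pvSS l, 0 ≤ s := by
  induction l using List.reverseRecOn with
  | nil => intro s hs; simp [pvSS] at hs; omega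
  | append_singleton l x ih =>
    intro s hs
    rw [pvSS_append_singleton] at hs
    have hx : 0 ≤ x := h x (by simp)
    have hl : ∀ y ∈ l, 0 ≤ y := fun y hy => h y (by simp [hy])
    rcases List.mem_append.mp hs with hs | hs
    · exact ih hl s hs
    · obtain ⟨c, hc, rfl⟩ := List.mem_map.mp hs
      have := ih hl c hc
      omega

theorem pvSS_zero_mem (l : List Int) : (0 : Int) ∈ pvSS l := by
  induction l using List.reverseRecOn with
  | nil => simp [pvSS]
  | append_singleton l x ih => rw [pvSS_append_singleton]; simp [ih]

theorem pvSS_subperm (l : List Int) : (0 :: l).Subperm (pvSS l) := by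
  induction l using List.reverseRecOn with
  | nil => simp [pvSS]
  | append_singleton l x ih =>
    rw [pvSS_append_singleton]
    have h1 : (0 :: (l ++ [x])).Perm ((0 :: l) ++ [x]) := by simp
    refine List.Subperm.trans h1.subperm ?_
    refine List.Subperm.append ih ?_
    have : x ∈ (pvSS l).map (fun c => c + x) := List.mem_map.mpr ⟨0, pvSS_zero_mem l, by ring⟩
    simpa using List.singleton_subperm_iff.mpr this

theorem pvSS_cons (x : Int) (l : List Int) :
    (pvSS (x :: l)).Perm (pvSS l ++ (pvSS l).map (fun c => c + x)) := by
  induction l using List.reverseRecOn with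
  | nil => simp [pvSS]
  | append_singleton l y ih =>
    have h0 : x :: (l ++ [y]) = (x :: l) ++ [y] := by simp
    rw [h0, pvSS_append_singleton, pvSS_append_singleton]
    have hmapcomm : ∀ (A : List Int) (u v : Int),
        (A.map (fun c => c + u)).map (fun c => c + v) = (A.map (fun c => c + v)).map (fun c => c + u) := by
      intro A u v
      simp only [List.map_map]
      refine List.map_congr_left ?_
      intro a _
      simp [Function.comp]
      ring
    have step1 : ((pvSS (x :: l)) ++ (pvSS (x :: l)).map (fun c => c + y)).Perm
        ((pvSS l ++ (pvSS l).map (fun c => c + x)) ++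
         ((pvSS l).map (fun c => c + y) ++ ((pvSS l).map (fun c => c + x)).map (fun c => c + y))) := by
      have := ih.append (ih.map (fun c => c + y))
      simpa [List.map_append] using this
    refine step1.trans ?_
    have := juggle1 (pvSS l) ((pvSS l).map (fun c => c + x)) ((pvSS l).map (fun c => c + y))
      (((pvSS l).map (fun c => c + x)).map (fun c => c + y))
    refine this.trans ?_
    rw [List.map_append, hmapcomm]

theorem pvSS_nes_perm (l : List Int) : (pvSS l).Perm (0 :: pvNes l) := by
  induction l with
  | nil => simp [pvSS, pvNes]
  | cons x t ih =>
    refine (pvSS_cons x t).trans ?_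
    have h1 : (pvSS t ++ (pvSS t).map (fun c => c + x)).Perm
        ((0 :: pvNes t) ++ (0 :: pvNes t).map (fun c => c + x)) := ih.append (ih.map _)
    refine h1.trans ?_
    have h2 : (0 :: pvNes t).map (fun c => c + x) = x :: (pvNes t).map (fun u => x + u) := by
      simp only [List.map_cons, Int.zero_add]
      congr 1
      refine List.map_congr_left ?_
      intro a _
      ring
    rw [h2]
    have h3 := juggle2 (0 :: pvNes t) ((pvNes t).map (fun u => x + u)) x
    refine h3.trans ?_
    have h4 : ((pvNes t).map (fun u => x + u) ++ (0 :: pvNes t)).Perm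
        (0 :: (pvNes t ++ (pvNes t).map (fun u => x + u))) :=
      juggle2 ((pvNes t).map (fun u => x + u)) (pvNes t) 0
    refine (List.Perm.cons x h4).trans ?_
    have h5 : (x :: 0 :: (pvNes t ++ (pvNes t).map (fun u => x + u))).Perm
        (0 :: x :: (pvNes t ++ (pvNes t).map (fun u => x + u))) := List.Perm.swap _ _ _
    refine h5.trans ?_
    simp only [pvNes]
    exact List.Perm.cons 0 (List.Perm.cons x List.perm_append_comm)

theorem pairwise_take_drop_le {L : List Int} (hp : L.Pairwise (· ≤ ·)) {m : Nat} {a b : Int}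
    (ha : a ∈ L.take m) (hb : b ∈ L.drop m) : a ≤ b := by
  rw [← List.take_append_drop m L] at hp
  exact (List.pairwise_append.mp hp).2.2 a ha b hb

theorem b_step {kk : Nat} (hk : 1 ≤ kk) {x : Int} (hx : 0 ≤ x) (P : List Int) :
    pvStep kk ((pvSort P).take kk) x = (pvSort (P ++ P.map (fun c => c + x))).take kk := by
  have hstep : ∀ cur, pvStep kk cur x = (pvSort (cur ++ cur.map (fun c => c + x))).take kk := by
    intro cur; rfl
  rw [hstep]
  set C := (pvSort P).take kk with hC
  set D := (pvSort P).drop kk with hD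
  by_cases hlen : kk ≤ P.length
  · have hCD : (P ++ P.map (fun c => c + x)).Perm
        ((C ++ C.map (fun c => c + x)) ++ (D ++ D.map (fun c => c + x))) := by
      have h1 : P.Perm (C ++ D) := by
        rw [hC, hD, List.take_append_drop]
        exact (pvSort_perm P).symm
      have h2 := h1.append (h1.map (fun c => c + x))
      refine h2.trans ?_
      rw [List.map_append]
      exact juggle1 C D (C.map (fun c => c + x)) (D.map (fun c => c + x))
    rw [pvSort_congr_perm hCD]
    have hCk : C.length = kk := by rw [hC, List.length_take, pvSort_length]; omega
    refine (pvSort_take_append _ _ _ ?_ ?_).symm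
    · rw [List.length_append]; omega
    · intro b hb a ha
      set M := C ++ C.map (fun c => c + x) with hM
      have hcd : ∀ d ∈ D, a ≤ d := by
        intro d hd
        have hcnt : kk ≤ M.countP (fun c => decide (c ≤ d)) := by
          have hCc : C.countP (fun c => decide (c ≤ d)) = kk := by
            rw [← hCk]
            refine List.countP_eq_length.mpr ?_
            intro c hc
            simpa using pvSort_take_drop_le (hC ▸ hc) (hD ▸ hd)
          rw [hM, List.countP_append]
          omega
        exact pvSort_count_take_le hcnt a ha
      rcases List.mem_append.mp hb with hb' | hb'
      · exact hcd b hb'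
      · obtain ⟨d, hd, rfl⟩ := List.mem_map.mp hb'
        have := hcd d hd
        omega
  · have hD0 : D = [] := by
      rw [hD]
      refine List.drop_eq_nil_of_le ?_
      rw [pvSort_length]; omega
    have hCall : C = pvSort P := by
      rw [hC]
      refine List.take_of_length_le ?_
      rw [pvSort_length]; omega
    have hCP : C.Perm P := hCall ▸ pvSort_perm P
    have : (C ++ C.map (fun c => c + x)).Perm (P ++ P.map (fun c => c + x)) :=
      hCP.append (hCP.map _)
    rw [pvSort_congr_perm this]

theorem b_fold {kk : Nat} (hk : 1 ≤ kk) {l : List Int} (hl : ∀ x ∈ l, 0 ≤ x) :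
    l.foldl (pvStep kk) [0] = (pvSort (pvSS l)).take kk := by
  induction l using List.reverseRecOn with
  | nil =>
    have : pvSort (pvSS []) = [0] := rfl
    rw [this]
    rw [List.take_of_length_le (by simpa using hk)]
    rfl
  | append_singleton l x ih =>
    have hl' : ∀ y ∈ l, 0 ≤ y := fun y hy => hl y (by simp [hy])
    have hx : 0 ≤ x := hl x (by simp)
    rw [List.foldl_append, ih hl', List.foldl_cons, List.foldl_nil, b_step hk hx,
      ← pvSS_append_singleton]

theorem trunc_aux {kk : Nat} (hk : 1 ≤ kk) {ws : List Int} (hwl : ws.length = kk)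
    (hwn : ∀ w ∈ ws, 0 ≤ w) :
    ∀ t : List Int, (∀ b ∈ t, 0 ≤ b ∧ ∀ w ∈ ws, w ≤ b) →
      (pvSort (pvSS (ws ++ t))).take kk = (pvSort (pvSS ws)).take kk := by
  intro t
  induction t using List.reverseRecOn with
  | nil => simp
  | append_singleton t x ih =>
    intro ht
    have hx0 : 0 ≤ x := (ht x (by simp)).1
    have hxw : ∀ w ∈ ws, w ≤ x := (ht x (by simp)).2
    have ht' : ∀ b ∈ t, 0 ≤ b ∧ ∀ w ∈ ws, w ≤ b := fun b hb => ht b (by simp [hb])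
    have hq : ws ++ (t ++ [x]) = (ws ++ t) ++ [x] := by simp
    rw [hq, pvSS_append_singleton]
    set Q := pvSS (ws ++ t) with hQ
    have hQlen : kk ≤ Q.length := by
      rw [hQ, pvSS_length]
      calc kk ≤ 2 ^ kk := le_of_lt (Nat.lt_two_pow_self)
        _ ≤ 2 ^ (ws ++ t).length := by
            refine Nat.pow_le_pow_right (by norm_num) ?_
            rw [List.length_append, hwl]; omega
    have hcnt : kk ≤ Q.countP (fun c => decide (c ≤ x)) := by
      have hsub := pvSS_subperm (ws ++ t)
      have hle := hsub.countP_le (fun c => decide (c ≤ x))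
      rw [← hQ] at hle
      have : kk ≤ (0 :: (ws ++ t)).countP (fun c => decide (c ≤ x)) := by
        have hws : ws.countP (fun c => decide (c ≤ x)) = kk := by
          rw [← hwl]
          refine List.countP_eq_length.mpr ?_
          intro w hw
          simpa using hxw w hw
        rw [List.countP_cons, List.countP_append]
        omega
      omega
    have hQnn : ∀ s ∈ Q, 0 ≤ s := by
      refine pvSS_nonneg ?_
      intro y hy
      rcases List.mem_append.mp hy with hy | hy
      · exact hwn y hy
      · exact (ht' y hy).1
    rw [pvSort_take_append Q (Q.map (fun c => c + x)) kk hQlen ?_]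
    · exact ih ht'
    · intro b hb a ha
      obtain ⟨s, hs, rfl⟩ := List.mem_map.mp hb
      have ha' : a ≤ x := pvSort_count_take_le hcnt a ha
      have := hQnn s hs
      omega

def pvGen (ys : List Int) (n : Int) : Nat → Int × Int → List (Int × Int)
  | 0, t => [t]
  | f + 1, t =>
    if t.2 < n then
      t :: (pvGen ys n f (t.1 + PySem.List.pyGetD ys t.2 0, t.2 + 1) ++
        (if 0 < t.2 then
          pvGen ys n f (t.1 + PySem.List.pyGetD ys t.2 0 - PySem.List.pyGetD ys (t.2 - 1) 0, t.2 + 1)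
        else []))
    else [t]

def pvR (ys : List Int) (h : List (Int × Int)) : List (Int × Int) :=
  h.flatMap (pvGen ys ys.length ys.length)

theorem pvGen_stop (ys : List Int) (n : Int) (f : Nat) (t : Int × Int) (h : ¬ t.2 < n) :
    pvGen ys n f t = [t] := by
  cases f <;> simp [pvGen, h]

theorem pvGen_fuel (ys : List Int) (f g : Nat) (t : Int × Int) (h0 : 0 ≤ t.2)
    (hf : (ys.length : Int) - t.2 ≤ f) (hg : (ys.length : Int) - t.2 ≤ g) :
    pvGen ys ys.length f t = pvGen ys ys.length g t := by
  induction f generalizing g t with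
  | zero =>
    have hstop : ¬ t.2 < (ys.length : Int) := by omega
    rw [pvGen_stop _ _ _ _ hstop, pvGen_stop _ _ _ _ hstop]
  | succ f ih =>
    by_cases hlt : t.2 < (ys.length : Int)
    · cases g with
      | zero => exfalso; omega
      | succ g =>
        simp only [pvGen, hlt, if_true]
        rw [ih (t.1 + PySem.List.pyGetD ys t.2 0, t.2 + 1) (by simp; omega) (by simp; omega)
            (g := g) (by simp; omega)]
        by_cases hz : 0 < t.2
        · simp only [hz, if_true]
          rw [ih (t.1 + PySem.List.pyGetD ys t.2 0 - PySem.List.pyGetD ys (t.2 - 1) 0, t.2 + 1)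
              (by simp; omega) (by simp; omega) (g := g) (by simp; omega)]
        · simp only [hz, if_false]
    · rw [pvGen_stop _ _ _ _ hlt, pvGen_stop _ _ _ _ hlt]

theorem pvGen_self (ys : List Int) (n : Int) (f : Nat) (t : Int × Int) :
    t ∈ pvGen ys n f t := by
  cases f with
  | zero => simp [pvGen]
  | succ f => by_cases hlt : t.2 < n <;> simp [pvGen, hlt]

theorem pvGen_lb {ys : List Int} (hs : ys.Pairwise (· ≤ ·)) (hn : ∀ y ∈ ys, 0 ≤ y)
    (f : Nat) {t u : Int × Int} (h0 : 0 ≤ t.2) (hu : u ∈ pvGen ys ys.length f t) :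
    t.1 ≤ u.1 := by
  induction f generalizing t with
  | zero => simp [pvGen] at hu; subst hu; omega
  | succ f ih =>
    by_cases hlt : t.2 < (ys.length : Int)
    · have hidx : t.2.toNat < ys.length := by omega
      have hget : PySem.List.pyGetD ys t.2 0 = ys[t.2.toNat] :=
        PySem.List.pyGetD_eq_getElem ys 0 h0 (by simpa using hlt)
      have hy0 : 0 ≤ ys[t.2.toNat] := hn _ (List.getElem_mem hidx)
      simp only [pvGen, hlt, if_true, List.mem_cons, List.mem_append] at hu
      rcases hu with rfl | hu | hu
      · omega
      · have := ih (t := (t.1 + PySem.List.pyGetD ys t.2 0, t.2 + 1)) (by simp; omega) hu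
        simp only at this
        rw [hget] at this
        omega
      · by_cases hz : 0 < t.2
        · simp only [hz, if_true] at hu
          have hprev : PySem.List.pyGetD ys (t.2 - 1) 0 = ys[(t.2 - 1).toNat] :=
            PySem.List.pyGetD_eq_getElem ys 0 (by omega) (by simp; omega)
          have hmono : ys[(t.2 - 1).toNat] ≤ ys[t.2.toNat] :=
            List.pairwise_iff_getElem.mp hs _ _ (by omega) hidx (by omega)
          have := ih (t := (t.1 + PySem.List.pyGetD ys t.2 0 - PySem.List.pyGetD ys (t.2 - 1) 0, t.2 + 1)) (by simp; omega) hu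
          simp only at this
          rw [hget, hprev] at this
          omega
        · simp [hz] at hu
    · rw [pvGen_stop _ _ _ _ hlt] at hu
      simp at hu; subst hu; omega

theorem pyGetD_nat (ys : List Int) (m : Nat) (hm : m < ys.length) :
    PySem.List.pyGetD ys (m : Int) 0 = ys[m] := by
  rw [PySem.List.pyGetD_eq_getElem ys 0 (by positivity) (by simpa using hm)]
  simp


theorem pvGen_unfold (ys : List Int) {t : Int × Int} (h0 : 0 ≤ t.2)
    (hlt : t.2 < (ys.length : Int)) :
    pvGen ys ys.length ys.length t =
      t :: (pvGen ys ys.length ys.length (t.1 + PySem.List.pyGetD ys t.2 0, t.2 + 1) ++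
        (if 0 < t.2 then
          pvGen ys ys.length ys.length
            (t.1 + PySem.List.pyGetD ys t.2 0 - PySem.List.pyGetD ys (t.2 - 1) 0, t.2 + 1)
        else [])) := by
  set f := ys.length - t.2.toNat - 1 with hfdef
  have h1 : pvGen ys ys.length ys.length t = pvGen ys ys.length (f + 1) t :=
    pvGen_fuel ys ys.length (f + 1) t h0 (by omega) (by omega)
  rw [h1]
  simp only [pvGen, hlt, if_true]
  congr 1
  have he1 : pvGen ys (ys.length : Int) f (t.1 + PySem.List.pyGetD ys t.2 0, t.2 + 1) =
      pvGen ys (ys.length : Int) ys.length (t.1 + PySem.List.pyGetD ys t.2 0, t.2 + 1) :=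
    pvGen_fuel ys f ys.length _ (by simp; omega) (by simp; omega) (by simp; omega)
  by_cases hz : 0 < t.2
  · have he2 : pvGen ys (ys.length : Int) f
        (t.1 + PySem.List.pyGetD ys t.2 0 - PySem.List.pyGetD ys (t.2 - 1) 0, t.2 + 1) =
        pvGen ys (ys.length : Int) ys.length
        (t.1 + PySem.List.pyGetD ys t.2 0 - PySem.List.pyGetD ys (t.2 - 1) 0, t.2 + 1) :=
      pvGen_fuel ys f ys.length _ (by simp; omega) (by simp; omega) (by simp; omega)
    simp only [hz, if_true, he1, he2]
  · simp only [hz, if_false, he1]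

theorem pvGen_nes_stop (ys : List Int) (f : Nat) (s : Int) (j : Nat) (hj : j < ys.length)
    (hend : ys.length = j + 1) :
    ((pvGen ys ys.length f (s, (j : Int) + 1)).map (fun t => t.1)).Perm
      ((pvNes (ys.drop j)).map (fun u => s - ys[j] + u)) := by
  rw [pvGen_stop _ _ _ _ (by simp; omega)]
  rw [← List.getElem_cons_drop hj, List.drop_eq_nil_of_le (by omega)]
  have hh : s - ys[j] + ys[j] = s := by ring
  simp [pvNes, hh]
theorem pvGen_nes (ys : List Int) (f : Nat) (s : Int) (j : Nat) (hj : j < ys.length)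
    (hf : ys.length - (j + 1) ≤ f) :
    ((pvGen ys ys.length f (s, (j : Int) + 1)).map (fun t => t.1)).Perm
      ((pvNes (ys.drop j)).map (fun u => s - ys[j] + u)) := by
  induction f generalizing s j with
  | zero => exact pvGen_nes_stop ys 0 s j hj (by omega)
  | succ f ih =>
    by_cases hend : j + 1 < ys.length
    case neg => exact pvGen_nes_stop ys (f + 1) s j hj (by omega)
    case pos =>
    have hlt : ((j : Int) + 1) < (ys.length : Int) := by exact_mod_cast hend
    have hg1 : PySem.List.pyGetD ys ((j : Int) + 1) 0 = ys[j + 1] := by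
      rw [show ((j : Int) + 1) = ((j + 1 : Nat) : Int) by push_cast; ring, pyGetD_nat _ _ hend]
    have hg0 : PySem.List.pyGetD ys ((j : Int) + 1 - 1) 0 = ys[j] := by
      rw [show ((j : Int) + 1 - 1) = ((j : Nat) : Int) by push_cast; ring, pyGetD_nat _ _ hj]
    simp only [pvGen, hlt, if_true, show (0 : Int) < (j : Int) + 1 by omega, if_pos,
      List.map_cons, List.map_append, hg1, hg0]
    have ih1 := ih (s + ys[j + 1]) (j + 1) hend (by omega)
    have ih2 := ih (s + ys[j + 1] - ys[j]) (j + 1) hend (by omega)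
    have hcast : ((j : Int) + 1 + 1) = (((j + 1 : Nat)) : Int) + 1 := by push_cast; ring
    rw [hcast]
    have ih1' : ((pvGen ys (↑ys.length) f (s + ys[j + 1], ((j + 1 : Nat) : Int) + 1)).map
        (fun t => t.1)).Perm ((pvNes (ys.drop (j + 1))).map (fun u => s + u)) := by
      refine ih1.trans ?_
      rw [List.map_congr_left (fun u _ => by ring :
        ∀ u ∈ pvNes (ys.drop (j + 1)), s + ys[j + 1] - ys[j + 1] + u = s + u)]
    have ih2' : ((pvGen ys (↑ys.length) f (s + ys[j + 1] - ys[j], ((j + 1 : Nat) : Int) + 1)).map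
        (fun t => t.1)).Perm ((pvNes (ys.drop (j + 1))).map (fun u => s - ys[j] + u)) := by
      refine ih2.trans ?_
      rw [List.map_congr_left (fun u _ => by ring :
        ∀ u ∈ pvNes (ys.drop (j + 1)), s + ys[j + 1] - ys[j] - ys[j + 1] + u = s - ys[j] + u)]
    rw [← List.getElem_cons_drop hj]
    simp only [pvNes, List.map_cons, List.map_append, List.map_map]
    have hhead : s - ys[j] + ys[j] = s := by ring
    rw [hhead]
    refine List.Perm.cons s ?_
    refine List.Perm.append ?_ ih2'
    refine ih1'.trans ?_
    rw [List.map_congr_left (fun u _ => by simp [Function.comp]; ring :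
      ∀ u ∈ pvNes (ys.drop (j + 1)), s + u = ((fun u => s - ys[j] + u) ∘ fun u => ys[j] + u) u)]


theorem pvR_root (ys : List Int) (c : Int) :
    ((pvR ys [(c, 0)]).map (fun t => t.1)).Perm ((pvSS ys).map (fun u => c + u)) := by
  rw [pvR]
  simp only [List.flatMap_cons, List.flatMap_nil, List.append_nil]
  by_cases h0 : ys.length = 0
  · have hnil : ys = [] := List.length_eq_zero_iff.mp h0
    subst hnil
    simp [pvGen, pvSS]
  · have hlt : (0 : Int) < (ys.length : Int) := by omega
    rw [pvGen_unfold ys (t := (c, 0)) (by simp) (by simpa using hlt)]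
    have hg : PySem.List.pyGetD ys 0 0 = ys[0]'(by omega) := by
      rw [PySem.List.pyGetD_eq_getElem ys 0 (by omega) (by omega)]
      simp
    simp only [List.append_nil, List.map_cons, hg, lt_irrefl, if_false]
    have hnes := pvGen_nes ys ys.length (c + ys[0]'(by omega)) 0 (by omega) (by omega)
    have hnes' : ((pvGen ys (↑ys.length) ys.length (c + ys[0]'(by omega), 0 + 1)).map
        (fun t => t.1)).Perm ((pvNes ys).map (fun u => c + u)) := by
      have hc0 : ((0 : Nat) : Int) + 1 = 0 + 1 := by simp
      rw [← hc0]
      refine hnes.trans ?_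
      rw [List.drop_zero]
      rw [List.map_congr_left (fun u _ => by ring :
        ∀ u ∈ pvNes ys, c + ys[0]'(by omega) - ys[0]'(by omega) + u = c + u)]
    refine (List.Perm.cons c hnes').trans ?_
    have := ((pvSS_nes_perm ys).map (fun u => c + u)).symm
    simpa using this

theorem pvFoldMin_spec (t : List (Int × Int)) (a : Int × Int) :
    (t.foldl (fun m y => if pvLexLt y m then y else m) a = a ∨
      t.foldl (fun m y => if pvLexLt y m then y else m) a ∈ t) ∧
    (t.foldl (fun m y => if pvLexLt y m then y else m) a).1 ≤ a.1 ∧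
    ∀ y ∈ t, (t.foldl (fun m y => if pvLexLt y m then y else m) a).1 ≤ y.1 := by
  induction t generalizing a with
  | nil => simp
  | cons y t ih =>
    simp only [List.foldl_cons]
    obtain ⟨ihm, ihb, ihall⟩ := ih (if pvLexLt y a then y else a)
    have hba : (if pvLexLt y a then y else a).1 ≤ a.1 ∧ (if pvLexLt y a then y else a).1 ≤ y.1 := by
      by_cases hxy : pvLexLt y a = true
      · rw [if_pos hxy]
        simp only [pvLexLt, Bool.or_eq_true, decide_eq_true_eq, Bool.and_eq_true, beq_iff_eq] at hxy
        omega
      · rw [if_neg hxy]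
        simp only [pvLexLt, Bool.or_eq_true, decide_eq_true_eq, Bool.and_eq_true, beq_iff_eq] at hxy
        push_neg at hxy
        omega
    refine ⟨?_, by omega, ?_⟩
    · rcases ihm with h | h
      · rw [h]
        by_cases hxy : pvLexLt y a = true <;> simp [hxy]
      · simp [h]
    · intro z hz
      rcases List.mem_cons.mp hz with rfl | hz
      · omega
      · exact ihall z hz

theorem pvHeapMin_none (h : List (Int × Int)) : pvHeapMin h = none ↔ h = [] := by
  cases h <;> simp [pvHeapMin]

theorem pvHeapMin_spec {h : List (Int × Int)} {m : Int × Int} (hm : pvHeapMin h = some m) :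
    m ∈ h ∧ ∀ t ∈ h, m.1 ≤ t.1 := by
  match h with
  | [] => simp [pvHeapMin] at hm
  | x :: t =>
    simp only [pvHeapMin, Option.some_inj] at hm
    obtain ⟨hmem, hb, hall⟩ := pvFoldMin_spec t x
    rw [hm] at hmem hb hall
    constructor
    · rcases hmem with h | h
      · simp [h]
      · simp [h]
    · intro z hz
      rcases List.mem_cons.mp hz with rfl | hz
      · exact hb
      · exact hall z hz

theorem pvPop_perm {ys : List Int} {h : List (Int × Int)} {m : Int × Int} (hm : m ∈ h)
    (h0 : 0 ≤ m.2) (h1 : m.2 ≤ (ys.length : Int)) :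
    (pvR ys h).Perm (m :: pvR ys (pvPush ys ys.length m.1 m.2 (h.erase m))) := by
  have hhp : h.Perm (m :: h.erase m) := List.perm_cons_erase hm
  have h2 : (pvR ys h).Perm (pvR ys (m :: h.erase m)) :=
    List.Perm.flatMap hhp (fun a _ => List.Perm.refl _)
  refine h2.trans ?_
  rw [pvR, List.flatMap_cons]
  by_cases hlt : m.2 < (ys.length : Int)
  · rw [pvGen_unfold ys h0 hlt]
    set c1 : Int × Int := (m.1 + PySem.List.pyGetD ys m.2 0, m.2 + 1) with hc1
    set c2 : Int × Int := (m.1 + PySem.List.pyGetD ys m.2 0 - PySem.List.pyGetD ys (m.2 - 1) 0,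
      m.2 + 1) with hc2
    by_cases hz : 0 < m.2
    · have hpush : pvPush ys (ys.length : Int) m.1 m.2 (h.erase m) = c2 :: c1 :: h.erase m := by
        simp only [pvPush]
        rw [if_pos hlt, if_pos (by omega : m.2 ≠ 0)]
      rw [hpush]
      simp only [pvR, List.flatMap_cons, hz, if_true]
      refine List.Perm.trans ?_ (List.Perm.cons m (List.perm_append_comm_assoc
        (pvGen ys (↑ys.length) ys.length c1) (pvGen ys (↑ys.length) ys.length c2)
        (List.flatMap (pvGen ys (↑ys.length) ys.length) (h.erase m))))
      simp [List.append_assoc]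
    · have hpush : pvPush ys (ys.length : Int) m.1 m.2 (h.erase m) = c1 :: h.erase m := by
        simp only [pvPush]
        rw [if_pos hlt, if_neg (by omega : ¬ m.2 ≠ 0)]
      rw [hpush]
      simp only [pvR, List.flatMap_cons, hz, if_false]
      simp [List.append_assoc]
  · rw [pvGen_stop _ _ _ _ hlt]
    have hpush : pvPush ys (ys.length : Int) m.1 m.2 (h.erase m) = h.erase m := by
      simp only [pvPush]
      rw [if_neg hlt]
    rw [hpush]
    simp [pvR]

theorem pvPush_valid {ys : List Int} {h : List (Int × Int)}
    (hv : ∀ t ∈ h, 0 ≤ t.2 ∧ t.2 ≤ (ys.length : Int)) {pre i : Int} (hi : 0 ≤ i) :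
    ∀ t ∈ pvPush ys ys.length pre i h, 0 ≤ t.2 ∧ t.2 ≤ (ys.length : Int) := by
  intro t ht
  simp only [pvPush] at ht
  by_cases hlt : i < (ys.length : Int)
  · rw [if_pos hlt] at ht
    by_cases hz : i ≠ 0
    · rw [if_pos hz] at ht
      rcases List.mem_cons.mp ht with rfl | ht
      · constructor <;> simp <;> omega
      · rcases List.mem_cons.mp ht with rfl | ht
        · constructor <;> simp <;> omega
        · exact hv t ht
    · rw [if_neg hz] at ht
      rcases List.mem_cons.mp ht with rfl | ht
      · constructor <;> simp <;> omega
      · exact hv t ht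
  · rw [if_neg hlt] at ht
    exact hv t ht

theorem pvR_lb {ys : List Int} (hs : ys.Pairwise (· ≤ ·)) (hn : ∀ y ∈ ys, 0 ≤ y)
    {h : List (Int × Int)} (hv : ∀ t ∈ h, 0 ≤ t.2 ∧ t.2 ≤ (ys.length : Int))
    {m : Int × Int} (hmin : ∀ t ∈ h, m.1 ≤ t.1) : ∀ u ∈ pvR ys h, m.1 ≤ u.1 := by
  intro u hu
  rw [pvR, List.mem_flatMap] at hu
  obtain ⟨t, ht, hg⟩ := hu
  have := pvGen_lb hs hn ys.length (hv t ht).1 hg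
  have := hmin t ht
  omega

theorem pvR_mem_fst {ys : List Int} {h : List (Int × Int)} {m : Int × Int} (hm : m ∈ h) :
    m.1 ∈ (pvR ys h).map (fun t => t.1) := by
  refine List.mem_map.mpr ⟨m, ?_, rfl⟩
  rw [pvR, List.mem_flatMap]
  exact ⟨m, hm, pvGen_self ys ys.length ys.length m⟩

theorem pvLoop_inv {ys : List Int} (hs : ys.Pairwise (· ≤ ·)) (hn : ∀ y ∈ ys, 0 ≤ y) :
    ∀ (j : Nat) (h : List (Int × Int)), (∀ t ∈ h, 0 ≤ t.2 ∧ t.2 ≤ (ys.length : Int)) →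
    j ≤ (pvR ys h).length →
    ∃ h', pvALoop ys ys.length j h = some h' ∧ (∀ t ∈ h', 0 ≤ t.2 ∧ t.2 ≤ (ys.length : Int)) ∧
      ((pvR ys h').map (fun t => t.1)).Perm ((pvSort ((pvR ys h).map (fun t => t.1))).drop j) := by
  intro j
  induction j with
  | zero =>
    intro h hv _
    refine ⟨h, rfl, hv, ?_⟩
    rw [List.drop_zero]
    exact (pvSort_perm _).symm
  | succ j ih =>
    intro h hv hlen
    have hne : h ≠ [] := by
      intro hnil
      subst hnil
      simp [pvR] at hlen
    obtain ⟨m, heq⟩ : ∃ m, pvHeapMin h = some m := by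
      cases heq : pvHeapMin h with
      | none => exact absurd ((pvHeapMin_none h).mp heq) hne
      | some m => exact ⟨m, rfl⟩
    obtain ⟨hmem, hmin⟩ := pvHeapMin_spec heq
    have hvm := hv m hmem
    have hpop := pvPop_perm hmem hvm.1 hvm.2
    set h₁ := pvPush ys ys.length m.1 m.2 (h.erase m) with hh₁
    have hv₁ : ∀ t ∈ h₁, 0 ≤ t.2 ∧ t.2 ≤ (ys.length : Int) :=
      pvPush_valid (fun t ht => hv t (List.mem_of_mem_erase ht)) hvm.1
    have hlen₁ : (pvR ys h).length = (pvR ys h₁).length + 1 := by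
      have := hpop.length_eq
      simpa using this
    obtain ⟨h', hloop, hv', hperm'⟩ := ih h₁ hv₁ (by omega)
    have hkey : pvSort ((pvR ys h).map (fun t => t.1)) =
        m.1 :: pvSort ((pvR ys h₁).map (fun t => t.1)) := by
      refine pvSort_min_cons ?_ ?_
      · have := hpop.map (fun t => t.1)
        simpa using this
      · intro b hb
        obtain ⟨u, hu, rfl⟩ := List.mem_map.mp hb
        exact pvR_lb hs hn hv hmin u hu
    refine ⟨h', ?_, hv', ?_⟩
    · simp only [pvALoop, heq]
      exact hloop
    · rw [hkey, List.drop_succ_cons]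
      exact hperm'

theorem pvAbsTot_aux (l : List Int) (t : Int) (a : List Int) :
    ((l.foldl (fun st x => if x ≥ 0 then (st.1 + x, st.2 ++ [x]) else (st.1, st.2 ++ [-x]))
      (t, a)).2).length = a.length + l.length ∧
    ((∀ y ∈ a, 0 ≤ y) → ∀ y ∈ (l.foldl
      (fun st x => if x ≥ 0 then (st.1 + x, st.2 ++ [x]) else (st.1, st.2 ++ [-x])) (t, a)).2,
      0 ≤ y) := by
  induction l generalizing t a with
  | nil => exact ⟨by simp, fun h => h⟩
  | cons x l ih =>
    simp only [List.foldl_cons]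
    by_cases hx : x ≥ 0
    · rw [if_pos hx]
      obtain ⟨ih1, ih2⟩ := ih (t + x) (a ++ [x])
      refine ⟨by rw [ih1]; simp; omega, fun ha => ih2 ?_⟩
      intro y hy
      rcases List.mem_append.mp hy with hy | hy
      · exact ha y hy
      · simp at hy; omega
    · rw [if_neg hx]
      obtain ⟨ih1, ih2⟩ := ih t (a ++ [-x])
      refine ⟨by rw [ih1]; simp; omega, fun ha => ih2 ?_⟩
      intro y hy
      rcases List.mem_append.mp hy with hy | hy
      · exact ha y hy
      · simp at hy; omega

theorem pvAbsTot_len (nums : List Int) : (pvAbsTot nums).2.length = nums.length := by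
  have := (pvAbsTot_aux nums 0 []).1
  simpa [pvAbsTot] using this

theorem pvAbsTot_nonneg (nums : List Int) : ∀ y ∈ (pvAbsTot nums).2, 0 ≤ y := by
  have := (pvAbsTot_aux nums 0 []).2
  refine fun y hy => this ?_ y hy
  simp

theorem A_eval {ys : List Int} (hPW : ys.Pairwise (· ≤ ·)) (hNN : ∀ y ∈ ys, 0 ≤ y)
    (tot k : Int) (hk : k ≤ (2 : Int) ^ ys.length) :
    ∃ h' m, pvALoop ys ys.length (k - 1).toNat [(-tot, 0)] = some h' ∧
      pvHeapMin h' = some m ∧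
      -m.1 = tot - (pvSort (pvSS ys)).getD (k - 1).toNat 0 := by
  set j := (k - 1).toNat with hj
  set n := ys.length with hn
  have hpow : ((2 : Int) ^ n) = ((2 ^ n : Nat) : Int) := by push_cast; ring
  have hjlt : j < 2 ^ n := by
    have h2 : (1 : Nat) ≤ 2 ^ n := Nat.one_le_two_pow
    rw [hpow] at hk
    omega
  have hval0 : ∀ t ∈ [((-tot : Int), (0 : Int))], 0 ≤ t.2 ∧ t.2 ≤ (n : Int) := by
    intro t ht
    simp at ht
    subst ht
    simp
  have hR0 := pvR_root ys (-tot)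
  have hR0len : (pvR ys [(-tot, 0)]).length = 2 ^ n := by
    have h1 := hR0.length_eq
    simp only [List.length_map] at h1
    rw [h1, pvSS_length]
  obtain ⟨h', hloop, hval', hperm'⟩ := pvLoop_inv hPW hNN j [(-tot, 0)] hval0 (by omega)
  set S := pvSort ((pvR ys [((-tot : Int), (0 : Int))]).map (fun t => t.1)) with hS
  have hSlen : S.length = 2 ^ n := by rw [hS, pvSort_length, List.length_map, hR0len]
  have hSj : j < S.length := by omega
  have hlenh' : (pvR ys h').length = 2 ^ n - j := by
    have h1 := hperm'.length_eq
    simp only [List.length_map, List.length_drop] at h1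
    rw [h1, hSlen]
  have hne : h' ≠ [] := by
    intro hnil
    subst hnil
    simp [pvR] at hlenh'
    omega
  obtain ⟨m, hmEq⟩ : ∃ m, pvHeapMin h' = some m := by
    cases heq : pvHeapMin h' with
    | none => exact absurd ((pvHeapMin_none h').mp heq) hne
    | some m => exact ⟨m, rfl⟩
  obtain ⟨hmmem, hmmin⟩ := pvHeapMin_spec hmEq
  refine ⟨h', m, hloop, hmEq, ?_⟩
  have hmem : m.1 ∈ S.drop j := hperm'.subset (pvR_mem_fst hmmem)
  have hub : ∀ b ∈ S.drop j, m.1 ≤ b := by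
    intro b hb
    obtain ⟨u, hu, rfl⟩ := List.mem_map.mp (hperm'.symm.subset hb)
    exact pvR_lb hPW hNN hval' hmmin u hu
  have hSpw : S.Pairwise (· ≤ ·) := hS ▸ pvSort_pairwise _
  have hlow : S[j] ≤ m.1 := sorted_drop_lb hSpw hSj m.1 hmem
  have hhigh : m.1 ≤ S[j] := by
    refine hub S[j] ?_
    rw [← List.getElem_cons_drop hSj]
    exact List.mem_cons_self
  have hm1 : m.1 = S[j] := by omega
  have hSval : S = (pvSort (pvSS ys)).map (fun u => -tot + u) := by
    rw [hS, pvSort_congr_perm hR0, pvSort_shift]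
  have hjlen : j < (pvSort (pvSS ys)).length := by
    rw [pvSort_length, pvSS_length]
    exact hjlt
  have hSj' : S[j] = -tot + (pvSort (pvSS ys))[j] := by
    have : S[j]'hSj = ((pvSort (pvSS ys)).map (fun u => -tot + u))[j]'(by
      rw [← hSval]; exact hSj) := by
      congr 1
    rw [this, List.getElem_map]
  rw [List.getD_eq_getElem _ _ hjlen]
  omega

theorem B_eval {ys : List Int} (hPW : ys.Pairwise (· ≤ ·)) (hNN : ∀ y ∈ ys, 0 ≤ y)
    (tot k : Int) (hk : k ≤ (2 : Int) ^ ys.length) :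
    tot - PySem.List.pyGetD
      ((ys.take (if k > 1 then k else 1).toNat).foldl (pvStep (if k > 1 then k else 1).toNat) [0])
      ((if k > 1 then k else 1) - 1) 0 =
    tot - (pvSort (pvSS ys)).getD (k - 1).toNat 0 := by
  set j := (k - 1).toNat with hj
  set n := ys.length with hn
  have hpow : ((2 : Int) ^ n) = ((2 ^ n : Nat) : Int) := by push_cast; ring
  have hjlt : j < 2 ^ n := by
    have h2 : (1 : Nat) ≤ 2 ^ n := Nat.one_le_two_pow
    rw [hpow] at hk
    omega
  set K : Int := if k > 1 then k else 1 with hK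
  have hKN : K.toNat = j + 1 := by rw [hK]; split <;> omega
  have hK1 : (1 : Nat) ≤ K.toNat := by omega
  have hKm1 : K - 1 = ((j : Nat) : Int) := by rw [hK]; split <;> omega
  have hfold : (ys.take K.toNat).foldl (pvStep K.toNat) [0] =
      (pvSort (pvSS (ys.take K.toNat))).take K.toNat :=
    b_fold hK1 (fun x hx => hNN x (List.mem_of_mem_take hx))
  have htr : (pvSort (pvSS (ys.take K.toNat))).take K.toNat =
      (pvSort (pvSS ys)).take K.toNat := by
    by_cases hcase : ys.length ≤ K.toNat
    · rw [List.take_of_length_le hcase]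
    · have hwl : (ys.take K.toNat).length = K.toNat := by
        rw [List.length_take]
        omega
      have haux := trunc_aux hK1 hwl (fun w hw => hNN w (List.mem_of_mem_take hw))
        (ys.drop K.toNat) ?_
      · rw [List.take_append_drop] at haux
        exact haux.symm
      · intro b hb
        refine ⟨hNN b (List.mem_of_mem_drop hb), ?_⟩
        intro w hw
        exact pairwise_take_drop_le hPW hw hb
    
  rw [hfold, htr, hKm1]
  have hjlen : j < (pvSort (pvSS ys)).length := by
    rw [pvSort_length, pvSS_length]
    exact hjlt
  have hcurlen : j < ((pvSort (pvSS ys)).take K.toNat).length := by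
    rw [List.length_take]
    omega
  rw [PySem.List.pyGetD_eq_getElem _ 0 (by positivity) (by exact_mod_cast hcurlen)]
  rw [List.getD_eq_getElem _ _ hjlen]
  simp only [Int.toNat_natCast]
  congr 1
  simp [List.getElem_take]

theorem main_eq (nums : List Int) (k : Int) (hk : k ≤ (2 : Int) ^ nums.length) :
    lc_2386 nums k = lc_2386_alt nums k := by
  have hPW : (PySem.List.sorted (pvAbsTot nums).2 (fun x => x) false).Pairwise (· ≤ ·) :=
    pvSort_pairwise (pvAbsTot nums).2
  have hNN : ∀ y ∈ PySem.List.sorted (pvAbsTot nums).2 (fun x => x) false, 0 ≤ y :=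
    fun y hy => pvAbsTot_nonneg nums y ((pvSort_perm (pvAbsTot nums).2).subset hy)
  have hlen : (PySem.List.sorted (pvAbsTot nums).2 (fun x => x) false).length = nums.length := by
    rw [show PySem.List.sorted (pvAbsTot nums).2 (fun x => x) false = pvSort (pvAbsTot nums).2
      from rfl, pvSort_length, pvAbsTot_len]
  have hk' : k ≤ (2 : Int) ^ (PySem.List.sorted (pvAbsTot nums).2 (fun x => x) false).length := by
    rw [hlen]; exact hk
  obtain ⟨h', m, hloop, hmin, hres⟩ := A_eval hPW hNN (pvAbsTot nums).1 k hk'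
  have hB := B_eval hPW hNN (pvAbsTot nums).1 k hk'
  simp only [lc_2386, lc_2386_alt, hloop, hmin]
  rw [hres, hB]

-- ===== VERDICT (by name: the statement is the Claim_ definition above) =====
theorem lc_2386_spec : Claim_equal_lc_2386 := by
  intro nums k _ hpre
  show lc_2386 nums k = lc_2386_alt nums k
  exact main_eq nums k hpre
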